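-- pv_equiv track=rewrite | github.com/Yash220402/practice_codes | __python__/removeDuplicateChars.py | reduced_String
-- ===== SOURCE A (Python) =====
-- class Pair:
--     def __init__(self,c ,ctr):
--         self.c= c
--         self.ctr = ctr
--
-- def reduced_String(k , s):
--     if (k == 1):
--         return ""
--     st = []
--     for i in range(len(s)):
--         if (len(st) == 0):
--             st.append((Pair(s[i] , 1)))
--             continue
--
--         if (st[-1].c == s[i]):
--             pair = st.pop()
--             pair.ctr +=1
--             if (pair.ctr == k):
--                 continue
--             else:
--                 st.append(pair)
--         else:
--             st.append((Pair(s[i] , 1)))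
--     ans = ""
--     while(len(st) > 0):
--         c = st[-1].c
--         cnt = st[-1].ctr
--         while(cnt >0):
--             ans  = c + ans
--             cnt -= 1
--         st.pop()
--
--     return (ans)
-- ===== SOURCE B (Python) =====
-- def reduced_String(k, s):
--     # repeated left-to-right scanning passes: delete a block the moment its
--     # consecutive-equal count reaches exactly k; repeat until a pass deletes nothing
--     cur = s
--     while True:
--         out = []
--         cnt = 0
--         changed = False
--         for ch in cur:
--             if out and out[-1] == ch:
--                 cnt += 1
--             else:
--                 cnt = 1
--             out.append(ch)
--             if cnt == k:
--                 del out[-k:]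
--                 cnt = 0
--                 changed = True
--         if not changed:
--             return cur
--         cur = "".join(out)
-- ===== Notes on version B (the rewrite author's own statement) =====
-- stated objective: alternative
-- what changed: Replaces A's single-pass counted stack (run-length pairs popped when a counter hits k) by repeated left-to-right scan-and-delete passes, deleting a block as soon as a consecutive-equal count reaches exactly k and repeating until a pass deletes nothing; output is built with a list and one join instead of A's char-by-char string prepending.
import Mathlib
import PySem

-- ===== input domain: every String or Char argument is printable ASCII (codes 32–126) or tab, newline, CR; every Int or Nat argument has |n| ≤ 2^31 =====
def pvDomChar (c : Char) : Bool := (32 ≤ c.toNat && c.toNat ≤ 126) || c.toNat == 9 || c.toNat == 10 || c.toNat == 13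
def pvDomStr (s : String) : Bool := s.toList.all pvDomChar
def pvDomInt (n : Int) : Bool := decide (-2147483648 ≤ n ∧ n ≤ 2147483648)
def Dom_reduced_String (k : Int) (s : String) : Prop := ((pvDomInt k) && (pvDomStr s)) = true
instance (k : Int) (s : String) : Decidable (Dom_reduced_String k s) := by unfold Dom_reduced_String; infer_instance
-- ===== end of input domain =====

-- B replaces A's single-pass counted stack by repeated left-to-right scan-and-delete
-- passes until a fixpoint (objective: alternative algorithm, not faster).

-- ===== PORT A =====
-- stack entry = (char, counter); head of list = top of Python's stack
def astep (k : Int) (st : List (Char × Int)) (c : Char) : List (Char × Int) :=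
  match st with
  | [] => [(c, 1)]
  | (tc, ctr) :: rest =>
    if tc = c then
      (if ctr + 1 = k then rest else (tc, ctr + 1) :: rest)
    else (c, 1) :: (tc, ctr) :: rest

-- inner while(cnt > 0): ans = c + ans
def aprepend (c : Char) (cnt : Int) (ans : List Char) : List Char :=
  if h : 0 < cnt then aprepend c (cnt - 1) (c :: ans) else ans
termination_by cnt.toNat
decreasing_by omega

-- outer while(len(st) > 0) unwinding the stack
def aunwind (st : List (Char × Int)) (ans : List Char) : List Char :=
  match st with
  | [] => ans
  | (c, cnt) :: rest => aunwind rest (aprepend c cnt ans)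

def reduced_String (k : Int) (s : String) : String :=
  if k = 1 then "" else String.ofList (aunwind (s.toList.foldl (astep k) []) [])

-- ===== PORT B =====
-- one scanning pass; out holds the output so far REVERSED (head = last appended)
def bpass (k : Int) (l : List Char) (out : List Char) (cnt : Int) (changed : Bool) :
    List Char × Bool :=
  match l with
  | [] => (out, changed)
  | c :: rest =>
    if (if out.head? = some c then cnt + 1 else 1) = k then
      bpass k rest ((c :: out).drop k.toNat) 0 true
    else
      bpass k rest (c :: out) (if out.head? = some c then cnt + 1 else 1) changed

-- termination measure for the outer while-loop: a changed pass strictly shrinks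
theorem bpass_len (k : Int) : ∀ (l out : List Char) (cnt : Int) (changed : Bool), 0 ≤ cnt →
    (bpass k l out cnt changed).1.length ≤ l.length + out.length ∧
    ((bpass k l out cnt changed).2 = true →
      changed = true ∨ (bpass k l out cnt changed).1.length < l.length + out.length) := by
  intro l
  induction l with
  | nil => intro out cnt changed h; simp [bpass]
  | cons c rest ih =>
    intro out cnt changed h
    simp only [bpass]
    by_cases hh : out.head? = some c
    · rw [if_pos hh]
      split
      · rename_i hk
        have hk1 : 1 ≤ k := by omega
        have := ih ((c :: out).drop k.toNat) 0 true le_rfl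
        have hd : ((c :: out).drop k.toNat).length = out.length + 1 - k.toNat := by
          simp [List.length_drop]
        refine ⟨by simp only [List.length_cons]; omega, fun _ => Or.inr ?_⟩
        simp only [List.length_cons]; omega
      · have := ih (c :: out) (cnt + 1) changed (by omega)
        refine ⟨by simp only [List.length_cons] at *; omega, fun h2 => ?_⟩
        rcases this.2 h2 with h3 | h3
        · exact Or.inl h3
        · right; simp only [List.length_cons] at *; omega
    · rw [if_neg hh]
      split
      · rename_i hk
        have hk1 : 1 ≤ k := by omega
        have := ih ((c :: out).drop k.toNat) 0 true le_rfl
        have hd : ((c :: out).drop k.toNat).length = out.length + 1 - k.toNat := by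
          simp [List.length_drop]
        refine ⟨by simp only [List.length_cons]; omega, fun _ => Or.inr ?_⟩
        simp only [List.length_cons]; omega
      · have := ih (c :: out) 1 changed (by omega)
        refine ⟨by simp only [List.length_cons] at *; omega, fun h2 => ?_⟩
        rcases this.2 h2 with h3 | h3
        · exact Or.inl h3
        · right; simp only [List.length_cons] at *; omega

-- while True: pass; if not changed: return cur; cur = join(out)
def bloop (k : Int) (cur : List Char) : List Char :=
  if h : (bpass k cur [] 0 false).2 = true then bloop k (bpass k cur [] 0 false).1.reverse
  else cur
termination_by cur.length
decreasing_by
  have := (bpass_len k cur [] 0 false le_rfl).2 h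
  rcases this with h2 | h2
  · simp at h2
  · simpa using h2

def reduced_String_alt (k : Int) (s : String) : String := String.ofList (bloop k s.toList)

-- ===== PRECONDITION & SPEC =====
def Spec_reduced_String (k : Int) (s : String) (out : String) : Prop := out = reduced_String_alt k s
instance (k : Int) (s : String) (out : String) : Decidable (Spec_reduced_String k s out) := by unfold Spec_reduced_String; infer_instance

-- ===== CLAIM (what is proved, stated in full; the proofs are below) =====
def Claim_equal_reduced_String : Prop := ∀ (k : Int) (s : String), Dom_reduced_String k s → Spec_reduced_String k s (reduced_String k s)

-- ===== LEMMAS AND PROOFS =====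

-- flatten a stack into the string it denotes (top at the right end)
def flatS : List (Char × Int) → List Char
  | [] => []
  | (c, cnt) :: rest => flatS rest ++ List.replicate cnt.toNat c

-- the list-level result of A's stack phase
def AcoreS (k : Int) (l : List Char) : List Char := flatS (l.foldl (astep k) [])

theorem astep_cons (k : Int) (tc : Char) (ctr : Int) (rest : List (Char × Int)) (c : Char) :
    astep k ((tc, ctr) :: rest) c
      = if tc = c then (if ctr + 1 = k then rest else (tc, ctr + 1) :: rest)
        else (c, 1) :: (tc, ctr) :: rest := rfl

theorem chain_tail {α : Type} {R : α → α → Prop} {a : α} {l : List α}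
    (h : List.IsChain R (a :: l)) : List.IsChain R l := List.IsChain.of_cons h

theorem aprepend_eq : ∀ (n : Nat) (c : Char) (cnt : Int) (ans : List Char), cnt.toNat = n →
    aprepend c cnt ans = List.replicate n c ++ ans := by
  intro n
  induction n with
  | zero =>
    intro c cnt ans h
    rw [aprepend, dif_neg (by omega)]
    simp
  | succ m ih =>
    intro c cnt ans h
    rw [aprepend, dif_pos (by omega), ih c (cnt - 1) (c :: ans) (by omega)]
    rw [List.replicate_succ', List.append_assoc]
    rfl

theorem aunwind_eq : ∀ (st : List (Char × Int)) (ans : List Char),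
    aunwind st ans = flatS st ++ ans := by
  intro st
  induction st with
  | nil => intro ans; simp [aunwind, flatS]
  | cons p rest ih =>
    intro ans
    obtain ⟨c, cnt⟩ := p
    rw [show aunwind ((c, cnt) :: rest) ans = aunwind rest (aprepend c cnt ans) from rfl]
    rw [ih, aprepend_eq cnt.toNat c cnt ans rfl, flatS, List.append_assoc]

-- invariant of A's stack: adjacent entries carry distinct chars, counters in [1, k)
def InvS (k : Int) (st : List (Char × Int)) : Prop :=
  List.IsChain (fun a b => a.1 ≠ b.1) st ∧ ∀ p ∈ st, 1 ≤ p.2 ∧ (2 ≤ k → p.2 < k)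

theorem astep_inv (k : Int) (st : List (Char × Int)) (c : Char) (h : InvS k st) :
    InvS k (astep k st c) := by
  obtain ⟨hc, hb⟩ := h
  cases st with
  | nil =>
    refine ⟨List.isChain_singleton _, ?_⟩
    intro p hp
    simp [astep] at hp
    subst hp
    exact ⟨le_refl _, by omega⟩
  | cons p rest =>
    obtain ⟨tc, ctr⟩ := p
    rw [astep_cons]
    by_cases h1 : tc = c
    · rw [if_pos h1]
      by_cases h2 : ctr + 1 = k
      · rw [if_pos h2]
        exact ⟨chain_tail hc, fun p hp => hb p (List.mem_cons_of_mem _ hp)⟩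
      · rw [if_neg h2]
        have hctr := hb (tc, ctr) (by simp)
        refine ⟨?_, ?_⟩
        · cases rest with
          | nil => exact List.isChain_singleton _
          | cons q r =>
            rw [List.isChain_cons_cons] at hc ⊢
            exact ⟨hc.1, hc.2⟩
        · intro p hp
          rcases List.mem_cons.mp hp with h3 | h3
          · subst h3
            refine ⟨by omega, fun hk => ?_⟩
            have := hctr.2 hk
            simp only at *
            omega
          · exact hb p (List.mem_cons_of_mem _ h3)
    · rw [if_neg h1]
      refine ⟨?_, ?_⟩
      · rw [List.isChain_cons_cons]
        exact ⟨fun e => h1 e.symm, hc⟩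
      · intro p hp
        rcases List.mem_cons.mp hp with h3 | h3
        · subst h3; exact ⟨le_refl _, by omega⟩
        · exact hb p h3

theorem foldl_inv (k : Int) : ∀ (l : List Char) (st : List (Char × Int)),
    InvS k st → InvS k (l.foldl (astep k) st) := by
  intro l
  induction l with
  | nil => intro st h; exact h
  | cons c rest ih => intro st h; exact ih _ (astep_inv k st c h)

theorem foldl_rep_lt (k : Int) (c : Char) : ∀ (n : Nat) (j : Int) (st : List (Char × Int)),
    1 ≤ j → j + n < k →
    List.foldl (astep k) ((c, j) :: st) (List.replicate n c) = (c, j + n) :: st := by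
  intro n
  induction n with
  | zero => intro j st h1 h2; simp
  | succ m ih =>
    intro j st h1 h2
    rw [List.replicate_succ, List.foldl_cons, astep_cons, if_pos rfl,
      if_neg (show ¬ (j + 1 = k) from by push_cast at h2; omega)]
    rw [ih (j + 1) st (by omega) (by push_cast at h2 ⊢; omega)]
    have : j + 1 + (m : Int) = j + ((m + 1 : Nat) : Int) := by push_cast; ring
    rw [this]

theorem foldl_rep_eq (k : Int) (c : Char) : ∀ (n : Nat) (j : Int) (st : List (Char × Int)),
    1 ≤ j → j < k → j + n = k →
    List.foldl (astep k) ((c, j) :: st) (List.replicate n c) = st := by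
  intro n
  induction n with
  | zero => intro j st h1 h2 h3; exfalso; push_cast at h3; omega
  | succ m ih =>
    intro j st h1 h2 h3
    rw [List.replicate_succ, List.foldl_cons, astep_cons, if_pos rfl]
    by_cases h4 : j + 1 = k
    · have hm : m = 0 := by push_cast at h3; omega
      subst hm
      rw [if_pos h4]
      simp
    · rw [if_neg h4]
      exact ih (j + 1) st (by omega) (by omega) (by push_cast at h3 ⊢; omega)

theorem absorb (k : Int) (hk : 2 ≤ k) (c : Char) : ∀ (st : List (Char × Int)), InvS k st →
    List.foldl (astep k) st (List.replicate k.toNat c) = st := by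
  intro st hst
  have hkn : k.toNat = (k.toNat - 1) + 1 := by omega
  cases st with
  | nil =>
    rw [hkn, List.replicate_succ, List.foldl_cons,
      show astep k [] c = [(c, 1)] from rfl]
    exact foldl_rep_eq k c (k.toNat - 1) 1 [] le_rfl (by omega) (by omega)
  | cons p rest =>
    obtain ⟨tc, j⟩ := p
    by_cases h1 : tc = c
    · rw [h1] at hst ⊢
      have hj := hst.2 (c, j) (by simp)
      have hj1 : 1 ≤ j := hj.1
      have hj2 : j < k := hj.2 hk
      have hsplit : List.replicate k.toNat c
          = List.replicate (k - j).toNat c ++ List.replicate j.toNat c := by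
        rw [← List.replicate_add]
        congr 1
        omega
      rw [hsplit, List.foldl_append]
      rw [foldl_rep_eq k c (k - j).toNat j rest hj1 hj2 (by omega)]
      have hjn : j.toNat = (j.toNat - 1) + 1 := by omega
      rw [hjn, List.replicate_succ, List.foldl_cons]
      have hstep : astep k rest c = (c, 1) :: rest := by
        cases rest with
        | nil => rfl
        | cons q r =>
          obtain ⟨qc, qj⟩ := q
          have hne : qc ≠ c := by
            have := (List.isChain_cons_cons.mp hst.1).1
            exact fun e => this e.symm
          rw [astep_cons, if_neg hne]
      rw [hstep, foldl_rep_lt k c (j.toNat - 1) 1 rest le_rfl (by omega)]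
      have : 1 + ((j.toNat - 1 : Nat) : Int) = j := by omega
      rw [this]
    · rw [hkn, List.replicate_succ, List.foldl_cons, astep_cons, if_neg h1]
      exact foldl_rep_eq k c (k.toNat - 1) 1 _ le_rfl (by omega) (by omega)

theorem acore_delete (k : Int) (hk : 2 ≤ k) (u : List Char) (c : Char) (v : List Char) :
    AcoreS k (u ++ (List.replicate k.toNat c ++ v)) = AcoreS k (u ++ v) := by
  unfold AcoreS
  rw [List.foldl_append, List.foldl_append, List.foldl_append]
  congr 1
  exact congrArg (fun st => List.foldl (astep k) st v)
    (absorb k hk c _ (foldl_inv k u [] ⟨List.isChain_nil, by simp⟩))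

theorem pass_acore (k : Int) (hk : k ≠ 1) : ∀ (l out : List Char) (cnt : Int) (changed : Bool),
    0 ≤ cnt → out.take cnt.toNat = List.replicate cnt.toNat (out.head?.getD 'a') →
    AcoreS k ((bpass k l out cnt changed).1.reverse) = AcoreS k (out.reverse ++ l) := by
  intro l
  induction l with
  | nil => intro out cnt changed h1 h2; simp [bpass]
  | cons c rest ih =>
    intro out cnt changed h1 h2
    simp only [bpass]
    by_cases hh : out.head? = some c
    · rw [if_pos hh]
      have htake : (c :: out).take (cnt + 1).toNat = List.replicate (cnt + 1).toNat c := by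
        have he : (cnt + 1).toNat = cnt.toNat + 1 := by omega
        rw [he, List.take_succ_cons, h2, hh]
        simp [List.replicate_succ]
      split
      · rename_i hkk
        have hk2 : 2 ≤ k := by omega
        have htk : (c :: out).take k.toNat = List.replicate k.toNat c := by
          rw [← hkk]; exact htake
        have hrev : (c :: out).reverse
            = ((c :: out).drop k.toNat).reverse ++ List.replicate k.toNat c := by
          conv_lhs => rw [← List.take_append_drop k.toNat (c :: out)]
          rw [List.reverse_append, htk, List.reverse_replicate]
        rw [ih ((c :: out).drop k.toNat) 0 true le_rfl (by simp)]
        have heq : out.reverse ++ c :: rest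
            = ((c :: out).drop k.toNat).reverse ++ (List.replicate k.toNat c ++ rest) := by
          have e1 : out.reverse ++ c :: rest = (c :: out).reverse ++ rest := by simp
          rw [e1, hrev, List.append_assoc]
        rw [heq, acore_delete k hk2 _ c rest]
      · rename_i hkk
        rw [ih (c :: out) (cnt + 1) changed (by omega) (by simpa using htake)]
        congr 1
        simp
    · rw [if_neg hh, if_neg (show ¬ ((1 : Int) = k) from fun e => hk e.symm)]
      rw [ih (c :: out) 1 changed (by omega) (by simp)]
      congr 1
      simp

theorem bpass_mono (k : Int) : ∀ (l out : List Char) (cnt : Int),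
    (bpass k l out cnt true).2 = true := by
  intro l
  induction l with
  | nil => intro out cnt; rfl
  | cons c rest ih =>
    intro out cnt
    simp only [bpass]
    split <;> [skip; skip] <;> first
      | exact ih _ _
      | (split <;> exact ih _ _)

-- relation between B's pass state and A's stack when no deletion has occurred
def RelS (st : List (Char × Int)) (out : List Char) (cnt : Int) : Prop :=
  flatS st = out.reverse ∧
  (match st with
   | [] => out = [] ∧ cnt = 0
   | (c, j) :: _ => cnt = j ∧ 0 ≤ j ∧ out.head? = some c)

theorem sim (k : Int) (hk : k ≠ 1) : ∀ (l : List Char) (st : List (Char × Int))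
    (out : List Char) (cnt : Int),
    RelS st out cnt → (bpass k l out cnt false).2 = false →
    flatS (List.foldl (astep k) st l) = out.reverse ++ l := by
  intro l
  induction l with
  | nil =>
    intro st out cnt hrel h
    simpa using hrel.1
  | cons c rest ih =>
    intro st out cnt hrel h
    cases st with
    | nil =>
      obtain ⟨hf, hout, hcnt⟩ := hrel
      subst hout; subst hcnt
      have h1k : ¬ ((1 : Int) = k) := fun e => hk e.symm
      rw [List.foldl_cons, show astep k [] c = [(c, 1)] from rfl]
      have e : (if ([] : List Char).head? = some c then (0 : Int) + 1 else 1) = 1 := by simp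
      have h' : (bpass k rest [c] 1 false).2 = false := by
        simp only [bpass] at h
        rwa [e, if_neg h1k] at h
      rw [ih [(c, 1)] [c] 1 ⟨by simp [flatS], rfl, by omega, rfl⟩ h']
      simp
    | cons p rest' =>
      obtain ⟨tc, j⟩ := p
      obtain ⟨hf, hcj, hj0, hhead⟩ := hrel
      by_cases hc : tc = c
      · subst hc
        have hcnt' : (if out.head? = some tc then cnt + 1 else 1) = j + 1 := by
          rw [if_pos hhead, hcj]
        by_cases hkk : j + 1 = k
        · exfalso
          simp only [bpass] at h
          rw [hcnt', if_pos hkk, bpass_mono] at h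
          exact Bool.noConfusion h
        · rw [List.foldl_cons, astep_cons, if_pos rfl, if_neg hkk]
          have h' : (bpass k rest (tc :: out) (j + 1) false).2 = false := by
            simp only [bpass] at h
            rwa [hcnt', if_neg hkk] at h
          have hflat : flatS ((tc, j + 1) :: rest') = (tc :: out).reverse := by
            show flatS rest' ++ List.replicate (j + 1).toNat tc = (tc :: out).reverse
            have he : (j + 1).toNat = j.toNat + 1 := by omega
            rw [he, List.replicate_succ', ← List.append_assoc, List.reverse_cons, ← hf]
            rfl
          rw [ih _ _ _ ⟨hflat, rfl, by omega, rfl⟩ h']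
          simp
      · have hne : ¬ (out.head? = some c) := by
          rw [hhead]
          exact fun e => hc (Option.some.inj e)
        have h1k : ¬ ((1 : Int) = k) := fun e => hk e.symm
        rw [List.foldl_cons, astep_cons, if_neg hc]
        have e : (if out.head? = some c then cnt + 1 else 1) = 1 := by rw [if_neg hne]
        have h' : (bpass k rest (c :: out) 1 false).2 = false := by
          simp only [bpass] at h
          rwa [e, if_neg h1k] at h
        have hflat : flatS ((c, 1) :: (tc, j) :: rest') = (c :: out).reverse := by
          show flatS ((tc, j) :: rest') ++ List.replicate (1 : Int).toNat c = (c :: out).reverse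
          rw [hf, List.reverse_cons]
          rfl
        rw [ih _ _ _ ⟨hflat, rfl, by omega, rfl⟩ h']
        simp

theorem fix_eq (k : Int) (hk : k ≠ 1) (l : List Char)
    (h : (bpass k l [] 0 false).2 = false) : AcoreS k l = l := by
  have := sim k hk l [] [] 0 ⟨rfl, rfl, rfl⟩ h
  simpa [AcoreS] using this

theorem bloop_eq (k : Int) (hk : k ≠ 1) : ∀ (n : Nat) (l : List Char), l.length ≤ n →
    AcoreS k l = bloop k l := by
  intro n
  induction n with
  | zero =>
    intro l hl
    have hnil : l = [] := by cases l with | nil => rfl | cons a t => simp at hl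
    subst hnil
    rw [bloop]
    rw [dif_neg (by simp [bpass])]
    rfl
  | succ m ih =>
    intro l hlen
    rw [bloop]
    split
    · rename_i h
      have hlt := (bpass_len k l [] 0 false le_rfl).2 h
      have hlt' : (bpass k l [] 0 false).1.length < l.length := by
        rcases hlt with h2 | h2
        · exact Bool.noConfusion h2
        · simpa using h2
      have e1 : AcoreS k ((bpass k l [] 0 false).1.reverse) = AcoreS k l := by
        have := pass_acore k hk l [] 0 false le_rfl (by simp)
        simpa using this
      rw [← e1]
      exact ih _ (by simp only [List.length_reverse]; omega)
    · rename_i h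
      exact fix_eq k hk l (by simpa using h)

theorem bpass_one_true : ∀ (rest : List Char), bpass 1 rest [] 0 true = ([], true) := by
  intro rest
  induction rest with
  | nil => rfl
  | cons c r ih =>
    rw [show bpass 1 (c :: r) [] 0 true = bpass 1 r [] 0 true from by
      simp only [bpass, List.head?_nil]
      rw [if_pos (by simp)]
      rfl]
    exact ih

theorem bloop_nil_one : bloop 1 ([] : List Char) = [] := by
  rw [bloop]
  rw [dif_neg (by simp [bpass])]

theorem bloop_one : ∀ (l : List Char), bloop 1 l = [] := by
  intro l
  cases l with
  | nil => exact bloop_nil_one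
  | cons c rest =>
    rw [bloop]
    have hb : bpass 1 (c :: rest) [] 0 false = ([], true) := by
      rw [show bpass 1 (c :: rest) [] 0 false = bpass 1 rest [] 0 true from by
        simp only [bpass, List.head?_nil]
        rw [if_pos (by simp)]
        rfl]
      exact bpass_one_true rest
    rw [dif_pos (by rw [hb])]
    rw [hb]
    simpa using bloop_nil_one

theorem main_eq (k : Int) (s : String) : reduced_String k s = reduced_String_alt k s := by
  unfold reduced_String reduced_String_alt
  by_cases hk : k = 1
  · subst hk
    rw [if_pos rfl, bloop_one]
  · rw [if_neg hk, aunwind_eq]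
    rw [List.append_nil]
    exact congrArg String.ofList (bloop_eq k hk s.toList.length s.toList le_rfl)

-- ===== VERDICT (by name: the statement is the Claim_ definition above) =====
theorem reduced_String_spec : Claim_equal_reduced_String := by
  intro k s _
  exact main_eq k s
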